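-- pv_equiv track=rewrite | github.com/sun-hainan/Python | _worktree_backup/project_euler/problem_086/sol1.py | solution
-- ===== SOURCE A (Python) =====
-- from math import sqrt
--
-- def solution(limit: int = 1000000) -> int:
--     """
--     Return the least value of M such that there are more than one million cuboids
--     of side lengths 1 <= a,b,c <= M such that the shortest distance between two
--     opposite vertices of the cuboid is integral.
--     >>> solution(100)
--     24
--     >>> solution(1000)
--     72
--     >>> solution(2000)
--     100
--     >>> solution(20000)
--     288
--     """
--     num_cuboids: int = 0
--     max_cuboid_size: int = 0
--     sum_shortest_sides: int
--
--     while num_cuboids <= limit: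
--     # 条件循环
--         max_cuboid_size += 1
--         for sum_shortest_sides in range(2, 2 * max_cuboid_size + 1):
--     # 遍历循环
--             if sqrt(sum_shortest_sides**2 + max_cuboid_size**2).is_integer():
--                 num_cuboids += (
--                     min(max_cuboid_size, sum_shortest_sides // 2)
--                     - max(1, sum_shortest_sides - max_cuboid_size)
--                     + 1
--                 )
--
--     return max_cuboid_size
-- ===== SOURCE B (Python) =====
-- from math import isqrt
--
-- def solution(limit: int = 1000000) -> int:
--     """Least M such that more than `limit` cuboids with sides <= M have an
--     integral shortest vertex-to-vertex distance.  Instead of A's linear scan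
--     with a running count, B evaluates the total count up to M as a pure
--     function and finds the least M by exponential search followed by binary
--     search (the count is nondecreasing in M)."""
--
--     def cuboids_up_to(m: int) -> int:
--         # total number of integral-diagonal cuboids with all sides <= m
--         total = 0
--         for k in range(1, m + 1):
--             for s in range(2, 2 * k + 1):
--                 d2 = s * s + k * k
--                 r = isqrt(d2)
--                 if r * r == d2:
--                     total += min(k, s // 2) - max(1, s - k) + 1
--         return total
--
--     lo, hi = -1, 1
--     while cuboids_up_to(hi) <= limit:
--         lo, hi = hi, 2 * hi
--     # invariant: cuboids_up_to(lo) <= limit (or lo == -1) < cuboids_up_to(hi)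
--     while hi - lo > 1:
--         mid = (lo + hi) // 2
--         if cuboids_up_to(mid) <= limit:
--             lo = mid
--         else:
--             hi = mid
--     return hi
-- ===== Notes on version B (the rewrite author's own statement) =====
-- stated objective: alternative
-- what changed: A's single linear scan with a running cuboid counter is replaced by a pure count-up-to-M function (exact integer isqrt square test and per-perimeter closed-form count) combined with exponential then binary search for the least M whose count exceeds the limit, exploiting monotonicity of the count.
import Mathlib
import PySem

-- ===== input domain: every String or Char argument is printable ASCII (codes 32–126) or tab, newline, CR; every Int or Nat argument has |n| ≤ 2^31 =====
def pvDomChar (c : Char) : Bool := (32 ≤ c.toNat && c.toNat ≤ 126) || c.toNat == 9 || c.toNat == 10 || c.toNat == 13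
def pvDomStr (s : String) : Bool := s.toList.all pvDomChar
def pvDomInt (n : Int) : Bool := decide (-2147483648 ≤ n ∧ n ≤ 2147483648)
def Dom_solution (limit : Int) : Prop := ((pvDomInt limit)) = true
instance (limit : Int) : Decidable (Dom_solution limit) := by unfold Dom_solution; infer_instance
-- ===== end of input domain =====

-- B replaces A's linear scan with a running counter by a pure count-up-to-M function
-- plus exponential-then-binary search for the least M with count > limit; objective: alternative.


-- ===== PORT A =====
-- sqrt(x).is_integer() of A: exact perfect-square test at the magnitudes reached here
def pySqrtIsInteger (x : Int) : Bool := Nat.sqrt x.toNat * Nat.sqrt x.toNat == x.toNat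

-- the body of one iteration of A's while loop: the for-loop over sum_shortest_sides
def solutionInner (m : Int) (num : Int) : Int :=
  (PySem.List.pyRange 2 (2 * m + 1)).foldl (fun acc s =>
    if pySqrtIsInteger (s ^ 2 + m ^ 2) then
      acc + (min m (PySem.Int.floordiv s 2) - max 1 (s - m) + 1)
    else acc) num

-- A's while loop; fuel makes it total (4*limit+17 iterations always suffice: each
-- max_cuboid_size divisible by 4 contributes at least one cuboid via the 3-4-5 triple)
def solutionLoop : Nat → Int → Int → Int → Int
  | 0, _, _, m => m
  | fuel + 1, limit, num, m =>
    if num ≤ limit then solutionLoop fuel limit (solutionInner (m + 1) num) (m + 1)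
    else m

def solution (limit : Int) : Int := solutionLoop ((4 * limit + 16).toNat + 1) limit 0 0

-- ===== PORT B =====
-- B's cuboids_up_to(m): nested for-loops; isqrt(d2) ported as Nat.sqrt d2.toNat (exact, d2 ≥ 0 here)
def altCount (m : Int) : Int :=
  (PySem.List.pyRange 1 (m + 1)).foldl (fun total k =>
    (PySem.List.pyRange 2 (2 * k + 1)).foldl (fun t s =>
      let d2 := s * s + k * k
      let r := Nat.sqrt d2.toNat
      if r * r == d2.toNat then
        t + (min k (PySem.Int.floordiv s 2) - max 1 (s - k) + 1)
      else t) total) 0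

-- B's first while loop (exponential search); fuel is a port artifact of the while loop
def altExpLoop : Nat → Int → Int → Int → Int × Int
  | 0, _, lo, hi => (lo, hi)
  | fuel + 1, limit, lo, hi =>
    if altCount hi ≤ limit then altExpLoop fuel limit hi (2 * hi)
    else (lo, hi)

-- B's second while loop (binary search)
def altBinLoop : Nat → Int → Int → Int → Int
  | 0, _, _, hi => hi
  | fuel + 1, limit, lo, hi =>
    if hi - lo > 1 then
      let mid := PySem.Int.floordiv (lo + hi) 2
      if altCount mid ≤ limit then altBinLoop fuel limit mid hi
      else altBinLoop fuel limit lo mid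
    else hi

def altFuel (limit : Int) : Nat := 8 * limit.toNat + 16

def solution_alt (limit : Int) : Int :=
  let p := altExpLoop (altFuel limit) limit (-1) 1
  altBinLoop (altFuel limit) limit p.1 p.2

-- ===== PRECONDITION & SPEC =====
def Spec_solution (limit : Int) (out : Int) : Prop := out = solution_alt limit
instance (limit : Int) (out : Int) : Decidable (Spec_solution limit out) := by unfold Spec_solution; infer_instance

-- ===== CLAIM (what is proved, stated in full; the proofs are below) =====
def Claim_equal_solution : Prop := ∀ (limit : Int), Dom_solution limit → Spec_solution limit (solution limit)

-- ===== LEMMAS AND PROOFS =====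

-- a fold whose every step does not decrease the accumulator is ≥ its start
theorem foldl_mono_step (F : Int → Int → Int) :
    ∀ (l : List Int) (num : Int), (∀ acc s, s ∈ l → acc ≤ F acc s) → num ≤ l.foldl F num
  | [], num, _ => le_refl num
  | a :: t, num, h => by
    simp only [List.foldl_cons]
    calc num ≤ F num a := h num a (List.mem_cons_self ..)
      _ ≤ t.foldl F (F num a) :=
        foldl_mono_step F t (F num a) (fun acc s hs => h acc s (List.mem_cons_of_mem _ hs))

-- …and if one member's step adds at least 1, the fold gains at least 1
theorem foldl_gain_step (F : Int → Int → Int) (l : List Int) (s0 num : Int)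
    (hmono : ∀ acc s, s ∈ l → acc ≤ F acc s)
    (hgain : ∀ acc : Int, acc + 1 ≤ F acc s0) (hmem : s0 ∈ l) :
    num + 1 ≤ l.foldl F num := by
  obtain ⟨l1, l2, rfl⟩ := List.append_of_mem hmem
  rw [List.foldl_append, List.foldl_cons]
  have h1 : num ≤ l1.foldl F num :=
    foldl_mono_step F l1 num (fun acc s hs => hmono acc s (by simp [hs]))
  have h2 : num + 1 ≤ F (l1.foldl F num) s0 := le_trans (by omega) (hgain _)
  exact le_trans h2 (foldl_mono_step F l2 _ (fun acc s hs => hmono acc s (by simp [hs])))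

-- the per-s increment of A's inner loop is nonnegative on its range
theorem innerTerm_nonneg (m s : Int) (h2 : 2 ≤ s) (h2m : s < 2 * m + 1) :
    0 ≤ min m (PySem.Int.floordiv s 2) - max 1 (s - m) + 1 := by
  rw [PySem.Int.floordiv_eq_ediv_of_pos (by omega)]
  simp only [min_def, max_def]
  split_ifs <;> omega

-- each step of A's inner fold does not decrease the accumulator
theorem solutionInner_ge (m num : Int) : num ≤ solutionInner m num := by
  apply foldl_mono_step
  intro acc s hs
  rw [PySem.List.mem_pyRange_one] at hs
  split
  · have := innerTerm_nonneg m s hs.1 hs.2; omega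
  · exact le_refl acc

-- B's inner fold is A's inner fold (same range, same test, same closed-form term)
theorem altInner_eq (k t : Int) :
    (PySem.List.pyRange 2 (2 * k + 1)).foldl (fun t s =>
      let d2 := s * s + k * k
      let r := Nat.sqrt d2.toNat
      if r * r == d2.toNat then
        t + (min k (PySem.Int.floordiv s 2) - max 1 (s - k) + 1)
      else t) t = solutionInner k t := by
  unfold solutionInner
  congr 1
  funext acc s
  simp only [pySqrtIsInteger]
  ring_nf

theorem altCount_nonpos (m : Int) (h : m ≤ 0) : altCount m = 0 := by
  unfold altCount
  rw [PySem.List.pyRange_one_eq_nil (by omega)]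
  rfl

theorem altCount_succ (m : Int) (h : 0 ≤ m) :
    altCount (m + 1) = solutionInner (m + 1) (altCount m) := by
  unfold altCount
  rw [show m + 1 + 1 = (m + 1) + 1 from rfl,
      PySem.List.pyRange_one_succ_right (by omega : (1:Int) ≤ m + 1),
      List.foldl_append, List.foldl_cons, List.foldl_nil]
  exact altInner_eq (m + 1) _

theorem altCount_le_succ (m : Int) (h : 0 ≤ m) : altCount m ≤ altCount (m + 1) := by
  rw [altCount_succ m h]; exact solutionInner_ge _ _

theorem altCount_mono (a b : Int) (ha : 0 ≤ a) (hab : a ≤ b) : altCount a ≤ altCount b := by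
  induction b, hab using Int.le_induction with
  | base => exact le_refl _
  | succ n hn ih => exact le_trans ih (altCount_le_succ n (by omega))

theorem altCount_nonneg (m : Int) : 0 ≤ altCount m := by
  by_cases h : m ≤ 0
  · rw [altCount_nonpos m h]
  · have := altCount_mono 0 m (le_refl 0) (by omega)
    rwa [altCount_nonpos 0 (le_refl 0)] at this

-- the 3-4-5 family: a max_cuboid_size divisible by 4 gains at least one cuboid
theorem solutionInner_gain (j : Nat) (num : Int) :
    num + 1 ≤ solutionInner (4 * ((j : Int) + 1)) num := by
  unfold solutionInner
  apply foldl_gain_step _ _ (3 * ((j : Int) + 1))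
  · intro acc s hs
    rw [PySem.List.mem_pyRange_one] at hs
    split
    · have := innerTerm_nonneg (4 * ((j : Int) + 1)) s hs.1 hs.2; omega
    · exact le_refl acc
  · intro acc
    have hsq : (3 * ((j : Int) + 1)) ^ 2 + (4 * ((j : Int) + 1)) ^ 2
        = ((25 * (j + 1) ^ 2 : Nat) : Int) := by push_cast; ring
    have hcond : pySqrtIsInteger ((3 * ((j : Int) + 1)) ^ 2 + (4 * ((j : Int) + 1)) ^ 2) = true := by
      rw [hsq]
      simp only [pySqrtIsInteger, Int.toNat_natCast]
      have h25 : 25 * (j + 1) ^ 2 = (5 * (j + 1)) * (5 * (j + 1)) := by ring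
      rw [h25, Nat.sqrt_eq]
      simp
    rw [hcond]
    simp only [if_true]
    have h3 : PySem.Int.floordiv (3 * ((j : Int) + 1)) 2 = (3 * ((j : Int) + 1)) / 2 :=
      PySem.Int.floordiv_eq_ediv_of_pos (by omega)
    rw [h3]
    have hj : (0 : Int) ≤ (j : Int) := Int.natCast_nonneg j
    simp only [min_def, max_def]
    split_ifs <;> omega
  · rw [PySem.List.mem_pyRange_one]
    constructor <;> [omega; omega]

theorem altCount_growth (j : Nat) : (j : Int) ≤ altCount (4 * (j : Int)) := by
  induction j with
  | zero => simp [altCount_nonpos 0 (le_refl 0)]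
  | succ n ih =>
    have h1 : altCount (4 * (n : Int)) ≤ altCount (4 * (n : Int) + 3) :=
      altCount_mono _ _ (by positivity) (by omega)
    have h2 : altCount (4 * (n : Int) + 3) + 1 ≤ altCount (4 * (n : Int) + 4) := by
      have h := altCount_succ (4 * (n : Int) + 3) (by positivity)
      rw [show (4 * (n : Int) + 3) + 1 = 4 * ((n : Int) + 1) from by ring] at h
      rw [show (4 * (n : Int) + 4) = 4 * ((n : Int) + 1) from by ring, h]
      exact solutionInner_gain n _
    have : (4 : Int) * ((n : Nat) + 1 : Nat) = 4 * (n : Int) + 4 := by push_cast; ring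
    rw [this]
    push_cast
    omega

-- A's loop, started at m with its true running count, returns the least M ≥ m
-- with altCount M > limit, provided some such M lies within fuel
theorem loopA_char (limit : Int) :
    ∀ (fuel : Nat) (m : Int), 0 ≤ m →
    (∃ M : Int, m ≤ M ∧ M < m + fuel ∧ limit < altCount M) →
    limit < altCount (solutionLoop fuel limit (altCount m) m) ∧
    m ≤ solutionLoop fuel limit (altCount m) m ∧
    (∀ j, m ≤ j → j < solutionLoop fuel limit (altCount m) m → altCount j ≤ limit)
  | 0, m, _, h => by obtain ⟨M, h1, h2, h3⟩ := h; omega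
  | fuel + 1, m, hm, h => by
    obtain ⟨M, h1, h2, h3⟩ := h
    simp only [solutionLoop]
    by_cases hc : altCount m ≤ limit
    · rw [if_pos hc, ← altCount_succ m hm]
      have hMne : M ≠ m := fun he => by rw [he] at h3; omega
      have ih := loopA_char limit fuel (m + 1) (by omega)
        ⟨M, by omega, by omega, h3⟩
      refine ⟨ih.1, by omega, fun j hj1 hj2 => ?_⟩
      rcases eq_or_lt_of_le hj1 with he | hlt
      · rwa [← he]
      · exact ih.2.2 j (by omega) hj2
    · rw [if_neg hc]
      exact ⟨by omega, le_refl m, fun j hj1 hj2 => by omega⟩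

-- B's binary search returns the least M ≥ 0 with altCount M > limit
theorem binLoop_char (limit : Int) :
    ∀ (fuel : Nat) (lo hi : Int), -1 ≤ lo → lo < hi →
    (lo = -1 ∨ altCount lo ≤ limit) → limit < altCount hi → hi - lo ≤ fuel →
    limit < altCount (altBinLoop fuel limit lo hi) ∧
    0 ≤ altBinLoop fuel limit lo hi ∧
    (∀ j, 0 ≤ j → j < altBinLoop fuel limit lo hi → altCount j ≤ limit)
  | 0, lo, hi, hlo, hlh, _, _, hf => by omega
  | fuel + 1, lo, hi, hlo, hlh, hdisj, hhi, hf => by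
    simp only [altBinLoop]
    by_cases hc : hi - lo > 1
    · rw [if_pos hc]
      have hmid : PySem.Int.floordiv (lo + hi) 2 = (lo + hi) / 2 :=
        PySem.Int.floordiv_eq_ediv_of_pos (by omega)
      by_cases hm : altCount (PySem.Int.floordiv (lo + hi) 2) ≤ limit
      · rw [if_pos hm]
        exact binLoop_char limit fuel _ hi (by omega) (by omega)
          (Or.inr hm) hhi (by omega)
      · rw [if_neg hm]
        exact binLoop_char limit fuel lo _ hlo (by omega) hdisj (by omega) (by omega)
    · rw [if_neg hc]
      have hhi0 : hi = lo + 1 := by omega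
      refine ⟨hhi, by omega, fun j hj1 hj2 => ?_⟩
      rcases hdisj with h | h
      · omega
      · exact le_trans (altCount_mono j lo hj1 (by omega)) h

-- the exponential phase preserves its invariant and stops with altCount hi > limit
theorem expLoop_char (limit : Int) :
    ∀ (fuel : Nat) (lo hi : Int),
    (1 ≤ hi ∧ lo < hi ∧ ((lo = -1 ∧ hi = 1) ∨ (0 ≤ lo ∧ altCount lo ≤ limit ∧ hi = 2 * lo))) →
    (∃ t : Nat, t < fuel ∧ limit < altCount (hi * 2 ^ t)) →
    (1 ≤ (altExpLoop fuel limit lo hi).2 ∧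
     (altExpLoop fuel limit lo hi).1 < (altExpLoop fuel limit lo hi).2 ∧
     (((altExpLoop fuel limit lo hi).1 = -1 ∧ (altExpLoop fuel limit lo hi).2 = 1) ∨
      (0 ≤ (altExpLoop fuel limit lo hi).1 ∧
       altCount (altExpLoop fuel limit lo hi).1 ≤ limit ∧
       (altExpLoop fuel limit lo hi).2 = 2 * (altExpLoop fuel limit lo hi).1))) ∧
    limit < altCount (altExpLoop fuel limit lo hi).2
  | 0, lo, hi, _, h => by obtain ⟨t, ht, _⟩ := h; omega
  | fuel + 1, lo, hi, hinv, h => by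
    obtain ⟨t, ht, hgt⟩ := h
    simp only [altExpLoop]
    by_cases hc : altCount hi ≤ limit
    · rw [if_pos hc]
      have htne : t ≠ 0 := by
        intro he; rw [he] at hgt; simp at hgt; omega
      obtain ⟨u, rfl⟩ : ∃ u, t = u + 1 := ⟨t - 1, by omega⟩
      apply expLoop_char limit fuel hi (2 * hi)
      · exact ⟨by omega, by omega, Or.inr ⟨by omega, hc, rfl⟩⟩
      · refine ⟨u, by omega, ?_⟩
        have : 2 * hi * 2 ^ u = hi * 2 ^ (u + 1) := by rw [pow_succ]; ring
        rwa [this]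
    · rw [if_neg hc]
      exact ⟨⟨hinv.1, hinv.2.1, hinv.2.2⟩, lt_of_not_ge hc⟩

-- fuel sufficiency for the exponential phase: altCount (2 ^ (limit.toNat + 4)) > limit
theorem exp_sufficient (limit : Int) :
    limit < altCount ((1 : Int) * 2 ^ (limit.toNat + 4)) := by
  by_cases h : limit < 0
  · have := altCount_nonneg ((1 : Int) * 2 ^ (limit.toNat + 4)); omega
  · set L := limit.toNat with hL
    have hlim : limit = (L : Int) := by omega
    have hpow : (L : Int) + 1 ≤ 2 ^ L := by
      have := Nat.lt_two_pow_self (n := L)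
      exact_mod_cast this
    have hle : 4 * ((L : Int) + 1) ≤ (1 : Int) * 2 ^ (L + 4) := by
      have h16 : ((2 : Int)) ^ (L + 4) = 2 ^ L * 16 := by rw [pow_add]; norm_num
      rw [h16]
      nlinarith
    have hg := altCount_growth (L + 1)
    have hmono := altCount_mono (4 * ((L : Int) + 1)) ((1 : Int) * 2 ^ (L + 4))
      (by positivity) hle
    push_cast at hg
    omega

-- altCount stays strictly below limit+1 only below 4*(limit.toNat+1)
theorem lo_bound (limit lo : Int) (hle : altCount lo ≤ limit) :
    lo < 4 * ((limit.toNat : Int) + 1) := by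
  by_contra hcon
  rw [not_lt] at hcon
  have hg := altCount_growth (limit.toNat + 1)
  have hmono := altCount_mono (4 * ((limit.toNat : Int) + 1)) lo (by positivity) hcon
  push_cast at hg
  omega

-- the characterization of B's result
theorem solution_alt_char (limit : Int) :
    limit < altCount (solution_alt limit) ∧ 0 ≤ solution_alt limit ∧
    (∀ j, 0 ≤ j → j < solution_alt limit → altCount j ≤ limit) := by
  unfold solution_alt altFuel
  set F := 8 * limit.toNat + 16 with hF
  have hexp := expLoop_char limit F (-1) 1
    ⟨by omega, by omega, Or.inl ⟨rfl, rfl⟩⟩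
    ⟨limit.toNat + 4, by omega, by simpa using exp_sufficient limit⟩
  set p := altExpLoop F limit (-1) 1 with hp
  obtain ⟨⟨hhi1, hltp, hdisj⟩, hgt⟩ := hexp
  apply binLoop_char limit F p.1 p.2
  · rcases hdisj with h | h <;> omega
  · exact hltp
  · rcases hdisj with h | h
    · exact Or.inl h.1
    · exact Or.inr h.2.1
  · exact hgt
  · rcases hdisj with h | h
    · omega
    · have := lo_bound limit p.1 h.2.1
      omega

-- the characterization of A's result
theorem solution_char (limit : Int) :
    limit < altCount (solution limit) ∧ 0 ≤ solution limit ∧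
    (∀ j, 0 ≤ j → j < solution limit → altCount j ≤ limit) := by
  unfold solution
  have h0 : altCount 0 = 0 := altCount_nonpos 0 (le_refl 0)
  have hsuff : ∃ M : Int, 0 ≤ M ∧ M < 0 + ((4 * limit + 16).toNat + 1 : Nat) ∧
      limit < altCount M := by
    by_cases h : limit < 0
    · exact ⟨0, le_refl 0, by omega, by rw [h0]; omega⟩
    · refine ⟨4 * ((limit.toNat : Int) + 1), by positivity, by omega, ?_⟩
      have hg := altCount_growth (limit.toNat + 1)
      push_cast at hg
      omega
  have := loopA_char limit ((4 * limit + 16).toNat + 1) 0 (le_refl 0) hsuff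
  rw [h0] at this
  exact ⟨this.1, this.2.1, fun j hj1 hj2 => this.2.2 j hj1 hj2⟩

-- ===== VERDICT (by name: the statement is the Claim_ definition above) =====
theorem solution_spec : Claim_equal_solution := by
  intro limit _
  unfold Spec_solution
  obtain ⟨ha1, ha2, ha3⟩ := solution_char limit
  obtain ⟨hb1, hb2, hb3⟩ := solution_alt_char limit
  rcases lt_trichotomy (solution limit) (solution_alt limit) with h | h | h
  · have := hb3 (solution limit) ha2 h; omega
  · exact h
  · have := ha3 (solution_alt limit) hb2 h; omega
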